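-- pv_equiv track=rewrite | github.com/kakao-harry-kr2/Algorithms | 05-May/20220504/2020_kakao_7.py | solution
-- ===== SOURCE A (Python) =====
-- from collections import deque
--
-- INF = 10 ** 4
--
-- def solution(board):
--     N = len(board)
--     H = [[INF] * (N-1) for _ in range(N)]
--     V = [[INF] * N for _ in range(N-1)]
--     H[0][0] = 0 # 초기 상태
--
--     q = deque([(0, 0, 0, 0)]) # dist, direction, i, j
--     while q:
--         dist, dir, i, j = q.popleft()
--         # H 상태로 도착
--         if dir == 0 and i == N-1 and j == N-2:
--             return dist
--         if dir == 1 and i == N-2 and j == N-1: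
--             return dist
--
--         # H 상태에서
--         if dir == 0:
--             # H 상태로 이동
--             if i >= 1 and not board[i-1][j] and not board[i-1][j+1] and H[i-1][j] == INF:
--                 H[i-1][j] = dist + 1
--                 q.append((dist+1, 0, i-1, j))
--             if i + 1 < N and not board[i+1][j] and not board[i+1][j+1] and H[i+1][j] == INF:
--                 H[i+1][j] = dist + 1
--                 q.append((dist+1, 0, i+1, j))
--             if j >= 1 and not board[i][j-1] and H[i][j-1] == INF:
--                 H[i][j-1] = dist + 1
--                 q.append((dist+1, 0, i, j-1))
--             if j + 2 < N and not board[i][j+2] and H[i][j+1] == INF: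
--                 H[i][j+1] = dist + 1
--                 q.append((dist+1, 0, i, j+1))
--
--             # V 상태로 이동
--             if i >= 1 and not board[i-1][j] and not board[i-1][j+1]:
--                 if V[i-1][j] == INF:
--                     V[i-1][j] = dist + 1
--                     q.append((dist+1, 1, i-1, j))
--                 if V[i-1][j+1] == INF:
--                     V[i-1][j+1] = dist + 1
--                     q.append((dist+1, 1, i-1, j+1))
--             if i + 1 < N and not board[i+1][j] and not board[i+1][j+1]:
--                 if V[i][j] == INF:
--                     V[i][j] = dist + 1
--                     q.append((dist+1, 1, i, j))
--                 if V[i][j+1] == INF: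
--                     V[i][j+1] = dist + 1
--                     q.append((dist+1, 1, i, j+1))
--
--         # V 상태에서
--         else:
--             # H 상태로 이동
--             if j >= 1 and not board[i][j-1] and not board[i+1][j-1]:
--                 if H[i][j-1] == INF:
--                     H[i][j-1] = dist + 1
--                     q.append((dist+1, 0, i, j-1))
--                 if H[i+1][j-1] == INF:
--                     H[i+1][j-1] = dist + 1
--                     q.append((dist+1, 0, i+1, j-1))
--             if j + 1 < N and not board[i][j+1] and not board[i+1][j+1]:
--                 if H[i][j] == INF:
--                     H[i][j] = dist + 1
--                     q.append((dist+1, 0, i, j))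
--                 if H[i+1][j] == INF:
--                     H[i+1][j] = dist + 1
--                     q.append((dist+1, 0, i+1, j))
--
--             # V 상태로 이동
--             if j >= 1 and not board[i][j-1] and not board[i+1][j-1] and V[i][j-1] == INF:
--                 V[i][j-1] = dist + 1
--                 q.append((dist+1, 1, i, j-1))
--             if j + 1 < N and not board[i][j+1] and not board[i+1][j+1] and V[i][j+1] == INF:
--                 V[i][j+1] = dist + 1
--                 q.append((dist+1, 1, i, j+1))
--             if i >= 1 and not board[i-1][j] and V[i-1][j] == INF:
--                 V[i-1][j] = dist + 1
--                 q.append((dist+1, 1, i-1, j))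
--             if i + 2 < N and not board[i+2][j] and V[i+1][j] == INF:
--                 V[i+1][j] = dist + 1
--                 q.append((dist+1, 1, i+1, j))
-- ===== SOURCE B (Python) =====
-- # Iterated reachability closure: no queue and no distance labels; round k holds
-- # exactly the states reachable in <= k moves, and the answer is the first round
-- # whose set contains a goal state.
-- def solution(board):
--     N = len(board)
--
--     def empty(i, j):
--         return 0 <= i < N and 0 <= j < N and not board[i][j]
--
--     def neighbors(s):
--         (a, b), (c, d) = s
--         if a == c:  # horizontal
--             cand = [
--                 (((a-1, b), (a-1, b+1)), [(a-1, b), (a-1, b+1)]),  # slide up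
--                 (((a+1, b), (a+1, b+1)), [(a+1, b), (a+1, b+1)]),  # slide down
--                 (((a, b-1), (a, b)),     [(a, b-1)]),              # slide left
--                 (((a, b+1), (a, b+2)),   [(a, b+2)]),              # slide right
--                 (((a-1, b), (a, b)),     [(a-1, b), (a-1, b+1)]),  # rotate up, pivot left
--                 (((a-1, b+1), (a, b+1)), [(a-1, b), (a-1, b+1)]),  # rotate up, pivot right
--                 (((a, b), (a+1, b)),     [(a+1, b), (a+1, b+1)]),  # rotate down, pivot left
--                 (((a, b+1), (a+1, b+1)), [(a+1, b), (a+1, b+1)]),  # rotate down, pivot right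
--             ]
--         else:  # vertical
--             cand = [
--                 (((a, b-1), (a, b)),     [(a, b-1), (a+1, b-1)]),  # rotate left, pivot top
--                 (((a+1, b-1), (a+1, b)), [(a, b-1), (a+1, b-1)]),  # rotate left, pivot bottom
--                 (((a, b), (a, b+1)),     [(a, b+1), (a+1, b+1)]),  # rotate right, pivot top
--                 (((a+1, b), (a+1, b+1)), [(a, b+1), (a+1, b+1)]),  # rotate right, pivot bottom
--                 (((a, b-1), (a+1, b-1)), [(a, b-1), (a+1, b-1)]),  # slide left
--                 (((a, b+1), (a+1, b+1)), [(a, b+1), (a+1, b+1)]),  # slide right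
--                 (((a-1, b), (a, b)),     [(a-1, b)]),              # slide up
--                 (((a+1, b), (a+2, b)),   [(a+2, b)]),              # slide down
--             ]
--         return [ns for ns, req in cand if all(empty(i, j) for i, j in req)]
--
--     reach = {((0, 0), (0, 1))}
--     for k in range(2 * N * N + 1):  # 2*N*N rounds saturate the closure
--         if any((N - 1, N - 1) in s for s in reach):
--             return k
--         reach = reach | {t for s in reach for t in neighbors(s)}
--     return None
-- ===== Notes on version B (the rewrite author's own statement) =====
-- stated objective: alternative
-- what changed: B abandons A's queue-driven BFS with direction-indexed INF-distance matrices entirely: it iterates the one-step reachability closure (round k's set is exactly the states reachable in at most k moves, recomputed as a whole-set relational image each round, with no queue, no visited marks and no per-state distances) and returns the index of the first round containing a goal state.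
-- outside the precondition, e.g. on solution([[0, 0], [1]]): A returns None, B returns None
import Mathlib
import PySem

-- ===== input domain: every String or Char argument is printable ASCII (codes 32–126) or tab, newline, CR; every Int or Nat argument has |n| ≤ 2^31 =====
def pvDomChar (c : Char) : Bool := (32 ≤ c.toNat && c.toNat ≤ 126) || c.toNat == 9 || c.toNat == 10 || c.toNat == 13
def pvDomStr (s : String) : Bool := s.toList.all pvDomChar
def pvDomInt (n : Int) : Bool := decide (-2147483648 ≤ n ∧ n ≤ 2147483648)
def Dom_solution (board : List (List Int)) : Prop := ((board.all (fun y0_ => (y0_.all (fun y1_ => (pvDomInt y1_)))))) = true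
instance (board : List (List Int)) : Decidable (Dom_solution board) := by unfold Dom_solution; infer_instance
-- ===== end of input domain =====

-- B drops A's queue-driven BFS with direction-indexed INF-distance matrices entirely and instead
-- iterates the one-step reachability closure (round k's set is exactly the states reachable in at
-- most k moves), returning the index of the first round that contains a goal state
-- (objective: alternative).

-- ===== PORT A =====
def pvINF : Int := 10 ^ 4

-- board[i][j] / H[i][j]: exact for the in-range, non-negative indices every access under
-- Pre_solution is (the defaults are never read there)
def pvGet2 (m : List (List Int)) (i j : Int) : Int :=
  PySem.List.pyGetD (PySem.List.pyGetD m i []) j 0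

-- H[i][j] = v: exact for the in-range, non-negative indices every write is
def pvSet2 (m : List (List Int)) (i j : Int) (v : Int) : List (List Int) :=
  PySem.List.pySetD m i (PySem.List.pySetD (PySem.List.pyGetD m i []) j v)

-- one guarded mark-and-enqueue block of A's loop body (cond is the Python if's test up to the
-- H/V '== INF' check, which every block carries)
def pvTryH (cond : Prop) [Decidable cond] (dist i' j' : Int)
    (t : List (List Int) × List (List Int) × List (Int × Int × Int × Int)) :
    List (List Int) × List (List Int) × List (Int × Int × Int × Int) :=
  if cond ∧ pvGet2 t.1 i' j' = pvINF then
    (pvSet2 t.1 i' j' (dist + 1), t.2.1, t.2.2 ++ [(dist + 1, 0, i', j')]) else t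

def pvTryV (cond : Prop) [Decidable cond] (dist i' j' : Int)
    (t : List (List Int) × List (List Int) × List (Int × Int × Int × Int)) :
    List (List Int) × List (List Int) × List (Int × Int × Int × Int) :=
  if cond ∧ pvGet2 t.2.1 i' j' = pvINF then
    (t.1, pvSet2 t.2.1 i' j' (dist + 1), t.2.2 ++ [(dist + 1, 1, i', j')]) else t

-- the while loop of A; fuel is a port artifact (40*N*N+2 bounds the number of iterations,
-- so the 0-fuel branch is never taken on inputs satisfying Pre_solution)
def loopA (board : List (List Int)) (N : Int) :
    List (List Int) → List (List Int) → List (Int × Int × Int × Int) → Nat → Option Int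
  | _, _, _, 0 => none
  | H, V, q, fuel + 1 =>
    match q with
    | [] => none
    | (dist, dir, i, j) :: qs =>
      if dir = 0 ∧ i = N - 1 ∧ j = N - 2 then some dist
      else if dir = 1 ∧ i = N - 2 ∧ j = N - 1 then some dist
      else if dir = 0 then
        -- H 상태에서 (each Python if-block, in order; the pure board test of a nested Python
        -- 'if' is repeated in its inner blocks: it reads only `board`, which never changes)
        let t : List (List Int) × List (List Int) × List (Int × Int × Int × Int) := (H, V, qs)
        let t := pvTryH (1 ≤ i ∧ pvGet2 board (i-1) j = 0 ∧ pvGet2 board (i-1) (j+1) = 0) dist (i-1) j t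
        let t := pvTryH (i + 1 < N ∧ pvGet2 board (i+1) j = 0 ∧ pvGet2 board (i+1) (j+1) = 0) dist (i+1) j t
        let t := pvTryH (1 ≤ j ∧ pvGet2 board i (j-1) = 0) dist i (j-1) t
        let t := pvTryH (j + 2 < N ∧ pvGet2 board i (j+2) = 0) dist i (j+1) t
        let t := pvTryV (1 ≤ i ∧ pvGet2 board (i-1) j = 0 ∧ pvGet2 board (i-1) (j+1) = 0) dist (i-1) j t
        let t := pvTryV (1 ≤ i ∧ pvGet2 board (i-1) j = 0 ∧ pvGet2 board (i-1) (j+1) = 0) dist (i-1) (j+1) t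
        let t := pvTryV (i + 1 < N ∧ pvGet2 board (i+1) j = 0 ∧ pvGet2 board (i+1) (j+1) = 0) dist i j t
        let t := pvTryV (i + 1 < N ∧ pvGet2 board (i+1) j = 0 ∧ pvGet2 board (i+1) (j+1) = 0) dist i (j+1) t
        loopA board N t.1 t.2.1 t.2.2 fuel
      else
        -- V 상태에서
        let t : List (List Int) × List (List Int) × List (Int × Int × Int × Int) := (H, V, qs)
        let t := pvTryH (1 ≤ j ∧ pvGet2 board i (j-1) = 0 ∧ pvGet2 board (i+1) (j-1) = 0) dist i (j-1) t
        let t := pvTryH (1 ≤ j ∧ pvGet2 board i (j-1) = 0 ∧ pvGet2 board (i+1) (j-1) = 0) dist (i+1) (j-1) t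
        let t := pvTryH (j + 1 < N ∧ pvGet2 board i (j+1) = 0 ∧ pvGet2 board (i+1) (j+1) = 0) dist i j t
        let t := pvTryH (j + 1 < N ∧ pvGet2 board i (j+1) = 0 ∧ pvGet2 board (i+1) (j+1) = 0) dist (i+1) j t
        let t := pvTryV (1 ≤ j ∧ pvGet2 board i (j-1) = 0 ∧ pvGet2 board (i+1) (j-1) = 0) dist i (j-1) t
        let t := pvTryV (j + 1 < N ∧ pvGet2 board i (j+1) = 0 ∧ pvGet2 board (i+1) (j+1) = 0) dist i (j+1) t
        let t := pvTryV (1 ≤ i ∧ pvGet2 board (i-1) j = 0) dist (i-1) j t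
        let t := pvTryV (i + 2 < N ∧ pvGet2 board (i+2) j = 0) dist (i+1) j t
        loopA board N t.1 t.2.1 t.2.2 fuel

def solution (board : List (List Int)) : Option Int :=
  let N : Int := board.length
  let H := List.replicate N.toNat (List.replicate (N - 1).toNat pvINF)
  let V := List.replicate (N - 1).toNat (List.replicate N.toNat pvINF)
  let H := pvSet2 H 0 0 0
  loopA board N H V [(0, 0, 0, 0)] (40 * board.length * board.length + 2)

-- ===== PORT B =====
-- a robot state is the pair of its two occupied cells
abbrev PvSt : Type := (Int × Int) × (Int × Int)

def pvStart : PvSt := ((0, 0), (0, 1))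

-- Source B's `cand` table
def pvMoves (s : PvSt) : List (PvSt × List (Int × Int)) :=
  match s with
  | ((a, b), (c, _d)) =>
    if a = c then -- horizontal
      [ (((a-1, b), (a-1, b+1)), [(a-1, b), (a-1, b+1)]),  -- slide up
        (((a+1, b), (a+1, b+1)), [(a+1, b), (a+1, b+1)]),  -- slide down
        (((a, b-1), (a, b)),     [(a, b-1)]),              -- slide left
        (((a, b+1), (a, b+2)),   [(a, b+2)]),              -- slide right
        (((a-1, b), (a, b)),     [(a-1, b), (a-1, b+1)]),  -- rotate up, pivot left
        (((a-1, b+1), (a, b+1)), [(a-1, b), (a-1, b+1)]),  -- rotate up, pivot right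
        (((a, b), (a+1, b)),     [(a+1, b), (a+1, b+1)]),  -- rotate down, pivot left
        (((a, b+1), (a+1, b+1)), [(a+1, b), (a+1, b+1)]) ] -- rotate down, pivot right
    else -- vertical
      [ (((a, b-1), (a, b)),     [(a, b-1), (a+1, b-1)]),  -- rotate left, pivot top
        (((a+1, b-1), (a+1, b)), [(a, b-1), (a+1, b-1)]),  -- rotate left, pivot bottom
        (((a, b), (a, b+1)),     [(a, b+1), (a+1, b+1)]),  -- rotate right, pivot top
        (((a+1, b), (a+1, b+1)), [(a, b+1), (a+1, b+1)]),  -- rotate right, pivot bottom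
        (((a, b-1), (a+1, b-1)), [(a, b-1), (a+1, b-1)]),  -- slide left
        (((a, b+1), (a+1, b+1)), [(a, b+1), (a+1, b+1)]),  -- slide right
        (((a-1, b), (a, b)),     [(a-1, b)]),              -- slide up
        (((a+1, b), (a+2, b)),   [(a+2, b)]) ]             -- slide down

-- Source B's `empty(i, j)`
def pvEmpty (board : List (List Int)) (N i j : Int) : Bool :=
  decide (0 ≤ i) && decide (i < N) && decide (0 ≤ j) && decide (j < N) &&
    decide (pvGet2 board i j = 0)

-- Source B's `neighbors(s)`
def pvNbrs (board : List (List Int)) (N : Int) (s : PvSt) : List PvSt :=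
  ((pvMoves s).filter (fun m => m.2.all (fun c => pvEmpty board N c.1 c.2))).map (·.1)

-- one round of Source B's loop body: `reach = reach | {t for s in reach for t in neighbors(s)}`
def pvStepVis (board : List (List Int)) (N : Int) (vis : PySem.Set PvSt) : PySem.Set PvSt :=
  PySem.Set.union vis (vis.flatMap (pvNbrs board N))

-- Source B's `for k in range(2*N*N+1)` loop: r counts the remaining rounds
def loopC (board : List (List Int)) (N : Int) :
    PySem.Set PvSt → Nat → Nat → Option Int
  | _, _, 0 => none
  | vis, k, r + 1 =>
    if vis.any (fun s => decide (s.1 = (N-1, N-1)) || decide (s.2 = (N-1, N-1))) then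
      some ((k : Nat) : Int)
    else loopC board N (pvStepVis board N vis) (k+1) r

def solution_alt (board : List (List Int)) : Option Int :=
  let N : Int := board.length
  loopC board N (PySem.Set.ofList [pvStart]) 0 (2 * board.length * board.length + 1)

-- ===== PRECONDITION & SPEC =====
-- Pre_solution excludes boards with fewer than 2 rows or with a row shorter than the number of
-- rows: there A's unguarded 2-D indexing in general raises IndexError (always for fewer than 2
-- rows; on a ragged board whether it raises depends on which cells the search reaches, so all
-- such boards are excluded, including the few on which A happens to return).
def Pre_solution (board : List (List Int)) : Prop :=
  2 ≤ board.length ∧ ∀ row ∈ board, board.length ≤ row.length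

instance (board : List (List Int)) : Decidable (Pre_solution board) := by
  unfold Pre_solution; infer_instance

def pvWitness_solution : List (List Int) := [[0, 0, 0], [0, 1, 0], [0, 0, 0]]

def Spec_solution (board : List (List Int)) (out : Option Int) : Prop := out = solution_alt board
instance (board : List (List Int)) (out : Option Int) : Decidable (Spec_solution board out) := by
  unfold Spec_solution; infer_instance

-- ===== CLAIM (what is proved, stated in full; the proofs are below) =====
def Claim_equal_solution : Prop :=
  ∀ (board : List (List Int)), Dom_solution board → Pre_solution board →
    Spec_solution board (solution board)


-- ===== LEMMAS AND PROOFS =====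

-- ---------- Step 1: A's loop is the abstract queue BFS loopQ over cell-pair states ----------

-- the pair of occupied cells of A's state (dir, i, j): dir 0 horizontal, dir 1 vertical
def pvEnc (dir i j : Int) : PvSt :=
  if dir = 0 then ((i, j), (i, j + 1)) else ((i, j), (i + 1, j))

def pvEncQ (t : Int × Int × Int × Int) : Int × PvSt := (t.1, pvEnc t.2.1 t.2.2.1 t.2.2.2)

-- A's state (dir, i, j) denotes a robot inside the N×N board
def pvInR (N dir i j : Int) : Prop :=
  (dir = 0 ∧ 0 ≤ i ∧ i < N ∧ 0 ≤ j ∧ j + 1 < N) ∨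
  (dir = 1 ∧ 0 ≤ i ∧ i + 1 < N ∧ 0 ≤ j ∧ j < N)

def pvShape (N : Int) (H V : List (List Int)) : Prop :=
  (H.length : Int) = N ∧ (∀ r ∈ H, (r.length : Int) = N - 1) ∧
  (V.length : Int) = N - 1 ∧ (∀ r ∈ V, (r.length : Int) = N)

-- A's "distance ≠ INF" marks and the abstract dict agree state by state
def pvMarks (N : Int) (H V : List (List Int)) (D : PySem.Dict PvSt Int) : Prop :=
  ∀ dir i j, pvInR N dir i j →
    ((if dir = 0 then pvGet2 H i j else pvGet2 V i j) = pvINF ↔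
      D.getD (pvEnc dir i j) pvINF = pvINF)

-- one guarded mark-and-enqueue step of the abstract queue BFS
def pvTryB (board : List (List Int)) (N d : Int)
    (acc : PySem.Dict PvSt Int × List (Int × PvSt)) (m : PvSt × List (Int × Int)) :
    PySem.Dict PvSt Int × List (Int × PvSt) :=
  if (m.2.all (fun c => pvEmpty board N c.1 c.2)) = true ∧ acc.1.getD m.1 pvINF = pvINF then
    (acc.1.insert m.1 (d + 1), acc.2 ++ [(d + 1, m.1)])
  else acc

-- the abstract queue BFS over cell-pair states (proof-side restatement of A's loop)
def loopQ (board : List (List Int)) (N : Int) :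
    PySem.Dict PvSt Int → List (Int × PvSt) → Nat → Option Int
  | _, _, 0 => none
  | dist, q, fuel + 1 =>
    match q with
    | [] => none
    | (d, s) :: qs =>
      if s.1 = (N - 1, N - 1) ∨ s.2 = (N - 1, N - 1) then some d
      else
        let r := (pvMoves s).foldl (pvTryB board N d) (dist, qs)
        loopQ board N r.1 r.2 fuel

-- the bisimulation invariant between A's loop state and the abstract loop state
def pvInv (N : Int)
    (t : List (List Int) × List (List Int) × List (Int × Int × Int × Int))
    (u : PySem.Dict PvSt Int × List (Int × PvSt)) : Prop :=
  pvShape N t.1 t.2.1 ∧ u.2 = t.2.2.map pvEncQ ∧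
  (∀ x ∈ t.2.2, pvInR N x.2.1 x.2.2.1 x.2.2.2) ∧ pvMarks N t.1 t.2.1 u.1

lemma pvEnc_inj (dir i j dir' i' j' : Int) (h : dir = 0 ∨ dir = 1) (h' : dir' = 0 ∨ dir' = 1) :
    pvEnc dir i j = pvEnc dir' i' j' ↔ dir = dir' ∧ i = i' ∧ j = j' := by
  rcases h with h | h <;> rcases h' with h' | h' <;> subst h <;> subst h' <;>
    simp [pvEnc, Prod.ext_iff] <;> omega

lemma pvGet2_repl (n c : Nat) (x : Int) (i j : Int)
    (hi0 : 0 ≤ i) (hi : i < (n : Int)) (hj0 : 0 ≤ j) (hj : j < (c : Int)) :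
    pvGet2 (List.replicate n (List.replicate c x)) i j = x := by
  unfold pvGet2
  rw [PySem.List.pyGetD_eq_getElem _ _ hi0 (by simpa using hi)]
  simp only [List.getElem_replicate]
  rw [PySem.List.pyGetD_eq_getElem _ _ hj0 (by simpa using hj)]
  simp

lemma pvGet2_pvSet2 (m : List (List Int)) (cols : Nat) (i j i' j' v : Int)
    (hc : ∀ r ∈ m, (r.length : Int) = (cols : Int))
    (hi0 : 0 ≤ i) (hi : i < m.length) (hj0 : 0 ≤ j) (hj : j < (cols : Int))
    (hi0' : 0 ≤ i') (hi' : i' < m.length) (hj0' : 0 ≤ j') (hj' : j' < (cols : Int)) :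
    pvGet2 (pvSet2 m i' j' v) i j = if i = i' ∧ j = j' then v else pvGet2 m i j := by
  have hrow' : (PySem.List.pyGetD m i' []) = m[i'.toNat]'(by omega) :=
    PySem.List.pyGetD_eq_getElem m [] hi0' hi'
  have hrl : ((m[i'.toNat]'(by omega) : List Int).length : Int) = (cols : Int) :=
    hc _ (List.getElem_mem _)
  unfold pvSet2 pvGet2
  rw [PySem.List.pySetD_of_nonneg _ _ hi0', hrow', PySem.List.pySetD_of_nonneg _ _ hj0']
  rw [PySem.List.pyGetD_eq_getElem _ _ hi0 (by simpa using hi)]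
  rw [PySem.List.pyGetD_eq_getElem _ _ hi0 hi]
  rw [List.getElem_set]
  by_cases hii : i = i'
  · subst hii
    rw [if_pos rfl]
    rw [PySem.List.pyGetD_eq_getElem _ _ hj0 (by simp; omega)]
    rw [PySem.List.pyGetD_eq_getElem _ _ hj0 (by omega)]
    rw [List.getElem_set]
    by_cases hjj : j = j'
    · subst hjj; rw [if_pos (by omega), if_pos ⟨rfl, rfl⟩]
    · rw [if_neg (by omega), if_neg (by simp [hjj])]
  · rw [if_neg (by omega)]
    simp [hii]

lemma pvShape_setH (N : Int) (H V : List (List Int)) (i j v : Int) (hsh : pvShape N H V)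
    (hi0 : 0 ≤ i) (hi : i < N) (hj0 : 0 ≤ j) : pvShape N (pvSet2 H i j v) V := by
  obtain ⟨hH, hHr, hV, hVr⟩ := hsh
  refine ⟨?_, ?_, hV, hVr⟩
  · unfold pvSet2; rw [PySem.List.pySetD_of_nonneg _ _ hi0]; simpa using hH
  · intro r hr
    unfold pvSet2 at hr; rw [PySem.List.pySetD_of_nonneg _ _ hi0] at hr
    rcases List.mem_or_eq_of_mem_set hr with hr | rfl
    · exact hHr _ hr
    · rw [PySem.List.pySetD_of_nonneg _ _ hj0]
      rw [PySem.List.pyGetD_eq_getElem H [] hi0 (by omega)]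
      simpa using hHr _ (List.getElem_mem _)

lemma pvShape_setV (N : Int) (H V : List (List Int)) (i j v : Int) (hsh : pvShape N H V)
    (hi0 : 0 ≤ i) (hi : i < N - 1) (hj0 : 0 ≤ j) : pvShape N H (pvSet2 V i j v) := by
  obtain ⟨hH, hHr, hV, hVr⟩ := hsh
  refine ⟨hH, hHr, ?_, ?_⟩
  · unfold pvSet2; rw [PySem.List.pySetD_of_nonneg _ _ hi0]; simpa using hV
  · intro r hr
    unfold pvSet2 at hr; rw [PySem.List.pySetD_of_nonneg _ _ hi0] at hr
    rcases List.mem_or_eq_of_mem_set hr with hr | rfl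
    · exact hVr _ hr
    · rw [PySem.List.pySetD_of_nonneg _ _ hj0]
      rw [PySem.List.pyGetD_eq_getElem V [] hi0 (by omega)]
      simpa using hVr _ (List.getElem_mem _)

lemma pvStepH (board : List (List Int)) (N dist : Int)
    (t : List (List Int) × List (List Int) × List (Int × Int × Int × Int))
    (u : PySem.Dict PvSt Int × List (Int × PvSt))
    (hInv : pvInv N t u)
    (i' j' : Int) (cb : Prop) [Decidable cb] (req : List (Int × Int)) (ns : PvSt)
    (hcb : cb ↔ (req.all (fun c => pvEmpty board N c.1 c.2)) = true)
    (hin : cb → pvInR N 0 i' j')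
    (hns : ns = pvEnc 0 i' j') :
    pvInv N (pvTryH cb dist i' j' t) (pvTryB board N dist u (ns, req)) := by
  simp only [pvTryH, pvTryB]
  obtain ⟨hsh, hq, hqr, hmk⟩ := hInv
  by_cases hc : cb
  · have hir := hin hc
    have hb : 0 ≤ i' ∧ i' < N ∧ 0 ≤ j' ∧ j' + 1 < N := by
      rcases hir with ⟨_, h⟩ | ⟨h0, h⟩
      · exact h
      · omega
    have htest : pvGet2 t.1 i' j' = pvINF ↔ u.1.getD ns pvINF = pvINF := by
      have h := hmk 0 i' j' hir; rw [if_pos rfl] at h; rwa [hns]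
    by_cases hm : pvGet2 t.1 i' j' = pvINF
    · rw [if_pos ⟨hc, hm⟩, if_pos ⟨hcb.mp hc, htest.mp hm⟩]
      obtain ⟨hH, hHr, hV, hVr⟩ := hsh
      refine ⟨pvShape_setH N t.1 t.2.1 i' j' (dist + 1) ⟨hH, hHr, hV, hVr⟩ hb.1 hb.2.1 hb.2.2.1,
        ?_, ?_, ?_⟩
      · simp [hq, pvEncQ, hns]
      · intro x hx
        rcases List.mem_append.mp hx with hx | hx
        · exact hqr x hx
        · simp at hx; subst hx; exact hir
      · intro dir i j hin2
        have hd2 : dir = 0 ∨ dir = 1 := by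
          rcases hin2 with ⟨h, _⟩ | ⟨h, _⟩ <;> omega
        rw [hns]
        simp only [PySem.Dict.getD_insert, pvEnc_inj dir i j 0 i' j' hd2 (Or.inl rfl)]
        rcases hd2 with h0 | h1
        · subst h0
          have hbi : 0 ≤ i ∧ i < N ∧ 0 ≤ j ∧ j + 1 < N := by
            rcases hin2 with ⟨_, h⟩ | ⟨h, h2⟩
            · exact h
            · omega
          rw [pvGet2_pvSet2 t.1 (N - 1).toNat i j i' j' (dist + 1)
            (by intro r hr; have := hHr r hr; omega)
            hbi.1 (by omega) hbi.2.2.1 (by omega) hb.1 (by omega) hb.2.2.1 (by omega)]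
          by_cases hij : i = i' ∧ j = j'
          · simp [hij]
          · simpa [hij] using hmk 0 i j hin2
        · subst h1
          simpa [(by omega : ¬((1:Int) = 0 ∧ i = i' ∧ j = j'))] using hmk 1 i j hin2
    · rw [if_neg (fun h => hm h.2), if_neg (fun h => hm (htest.mpr h.2))]
      exact ⟨hsh, hq, hqr, hmk⟩
  · rw [if_neg (fun h => hc h.1), if_neg (fun h => hc (hcb.mpr h.1))]
    exact ⟨hsh, hq, hqr, hmk⟩

lemma pvStepV (board : List (List Int)) (N dist : Int)
    (t : List (List Int) × List (List Int) × List (Int × Int × Int × Int))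
    (u : PySem.Dict PvSt Int × List (Int × PvSt))
    (hInv : pvInv N t u)
    (i' j' : Int) (cb : Prop) [Decidable cb] (req : List (Int × Int)) (ns : PvSt)
    (hcb : cb ↔ (req.all (fun c => pvEmpty board N c.1 c.2)) = true)
    (hin : cb → pvInR N 1 i' j')
    (hns : ns = pvEnc 1 i' j') :
    pvInv N (pvTryV cb dist i' j' t) (pvTryB board N dist u (ns, req)) := by
  simp only [pvTryV, pvTryB]
  obtain ⟨hsh, hq, hqr, hmk⟩ := hInv
  by_cases hc : cb
  · have hir := hin hc
    have hb : 0 ≤ i' ∧ i' + 1 < N ∧ 0 ≤ j' ∧ j' < N := by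
      rcases hir with ⟨h0, h⟩ | ⟨_, h⟩
      · omega
      · exact h
    have htest : pvGet2 t.2.1 i' j' = pvINF ↔ u.1.getD ns pvINF = pvINF := by
      have h := hmk 1 i' j' hir
      rw [if_neg (by norm_num)] at h; rwa [hns]
    by_cases hm : pvGet2 t.2.1 i' j' = pvINF
    · rw [if_pos ⟨hc, hm⟩, if_pos ⟨hcb.mp hc, htest.mp hm⟩]
      obtain ⟨hH, hHr, hV, hVr⟩ := hsh
      refine ⟨pvShape_setV N t.1 t.2.1 i' j' (dist + 1) ⟨hH, hHr, hV, hVr⟩ hb.1 (by omega) hb.2.2.1,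
        ?_, ?_, ?_⟩
      · simp [hq, pvEncQ, hns]
      · intro x hx
        rcases List.mem_append.mp hx with hx | hx
        · exact hqr x hx
        · simp at hx; subst hx; exact hir
      · intro dir i j hin2
        have hd2 : dir = 0 ∨ dir = 1 := by
          rcases hin2 with ⟨h, _⟩ | ⟨h, _⟩ <;> omega
        rw [hns]
        simp only [PySem.Dict.getD_insert, pvEnc_inj dir i j 1 i' j' hd2 (Or.inr rfl)]
        rcases hd2 with h0 | h1
        · subst h0
          simpa [(by omega : ¬((0:Int) = 1 ∧ i = i' ∧ j = j'))] using hmk 0 i j hin2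
        · subst h1
          have hbi : 0 ≤ i ∧ i + 1 < N ∧ 0 ≤ j ∧ j < N := by
            rcases hin2 with ⟨h, h2⟩ | ⟨_, h⟩
            · omega
            · exact h
          rw [pvGet2_pvSet2 t.2.1 N.toNat i j i' j' (dist + 1)
            (by intro r hr; have := hVr r hr; omega)
            hbi.1 (by omega) hbi.2.2.1 (by omega) hb.1 (by omega) hb.2.2.1 (by omega)]
          by_cases hij : i = i' ∧ j = j'
          · simp [hij]
          · simpa [hij] using hmk 1 i j hin2
    · rw [if_neg (fun h => hm h.2), if_neg (fun h => hm (htest.mpr h.2))]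
      exact ⟨hsh, hq, hqr, hmk⟩
  · rw [if_neg (fun h => hc h.1), if_neg (fun h => hc (hcb.mpr h.1))]
    exact ⟨hsh, hq, hqr, hmk⟩

lemma pvCond1 (board : List (List Int)) (N i1 j1 : Int) (g : Prop) [Decidable g]
    (hg : g ↔ (0 ≤ i1 ∧ i1 < N ∧ 0 ≤ j1 ∧ j1 < N)) :
    (g ∧ pvGet2 board i1 j1 = 0) ↔
      (([(i1, j1)] : List (Int × Int)).all (fun c => pvEmpty board N c.1 c.2)) = true := by
  simp only [List.all_cons, List.all_nil, Bool.and_eq_true, pvEmpty, decide_eq_true_eq, and_true]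
  tauto

lemma pvCond2 (board : List (List Int)) (N i1 j1 i2 j2 : Int) (g : Prop) [Decidable g]
    (hg : g ↔ (0 ≤ i1 ∧ i1 < N ∧ 0 ≤ j1 ∧ j1 < N ∧ 0 ≤ i2 ∧ i2 < N ∧ 0 ≤ j2 ∧ j2 < N)) :
    (g ∧ pvGet2 board i1 j1 = 0 ∧ pvGet2 board i2 j2 = 0) ↔
      (([(i1, j1), (i2, j2)] : List (Int × Int)).all (fun c => pvEmpty board N c.1 c.2)) = true := by
  simp only [List.all_cons, List.all_nil, Bool.and_eq_true, pvEmpty, decide_eq_true_eq, and_true]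
  tauto

set_option maxHeartbeats 2000000 in
lemma pv_loop_eq (board : List (List Int)) (N : Int) (fuel : Nat) :
    ∀ (H V : List (List Int)) (qA : List (Int × Int × Int × Int))
      (D : PySem.Dict PvSt Int) (qB : List (Int × PvSt)),
      pvInv N (H, V, qA) (D, qB) →
      loopA board N H V qA fuel = loopQ board N D qB fuel := by
  induction fuel with
  | zero => intro H V qA D qB _; rfl
  | succ fuel ih =>
    intro H V qA D qB hInv
    obtain ⟨hsh, hq, hqr, hmk⟩ := hInv
    cases qA with
    | nil =>
      simp only [List.map_nil] at hq
      subst hq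
      rfl
    | cons hd qs =>
      obtain ⟨dist, dir, i, j⟩ := hd
      have hir : pvInR N dir i j := hqr _ List.mem_cons_self
      have hqr' : ∀ x ∈ qs, pvInR N x.2.1 x.2.2.1 x.2.2.2 :=
        fun x hx => hqr x (List.mem_cons_of_mem _ hx)
      rw [show qB = (dist, pvEnc dir i j) :: qs.map pvEncQ from by simpa [pvEncQ] using hq]
      have h0 : pvInv N (H, V, qs) (D, qs.map pvEncQ) := ⟨hsh, rfl, hqr', hmk⟩
      rcases hir with ⟨hd0, hbnd⟩ | ⟨hd1, hbnd⟩
      · subst hd0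
        simp only [loopA, loopQ]
        by_cases hgoal : i = N - 1 ∧ j = N - 2
        · rw [if_pos ⟨trivial, hgoal⟩,
            if_pos (Or.inr (by simp [pvEnc, Prod.ext_iff]; omega) :
              (pvEnc 0 i j).1 = (N - 1, N - 1) ∨ (pvEnc 0 i j).2 = (N - 1, N - 1))]
        · rw [if_neg (fun h => hgoal h.2),
            if_neg (by norm_num : ¬((0:Int) = 1 ∧ i = N - 2 ∧ j = N - 1)), if_pos trivial,
            if_neg (by simp [pvEnc, Prod.ext_iff]; omega :
              ¬((pvEnc 0 i j).1 = (N - 1, N - 1) ∨ (pvEnc 0 i j).2 = (N - 1, N - 1)))]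
          rw [show pvMoves (pvEnc 0 i j) =
              [ (((i-1, j), (i-1, j+1)), [(i-1, j), (i-1, j+1)]),
                (((i+1, j), (i+1, j+1)), [(i+1, j), (i+1, j+1)]),
                (((i, j-1), (i, j)),     [(i, j-1)]),
                (((i, j+1), (i, j+2)),   [(i, j+2)]),
                (((i-1, j), (i, j)),     [(i-1, j), (i-1, j+1)]),
                (((i-1, j+1), (i, j+1)), [(i-1, j), (i-1, j+1)]),
                (((i, j), (i+1, j)),     [(i+1, j), (i+1, j+1)]),
                (((i, j+1), (i+1, j+1)), [(i+1, j), (i+1, j+1)]) ] from by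
            simp [pvEnc, pvMoves]]
          simp only [List.foldl_cons, List.foldl_nil]
          have h1 := pvStepH board N dist _ _ h0 (i-1) j _ [(i-1, j), (i-1, j+1)]
            ((i-1, j), (i-1, j+1))
            (pvCond2 board N (i-1) j (i-1) (j+1) (1 ≤ i) (by omega))
            (fun h => Or.inl ⟨rfl, by have := h.1; omega⟩)
            (by simp [pvEnc])
          have h2 := pvStepH board N dist _ _ h1 (i+1) j _ [(i+1, j), (i+1, j+1)]
            ((i+1, j), (i+1, j+1))
            (pvCond2 board N (i+1) j (i+1) (j+1) (i + 1 < N) (by omega))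
            (fun h => Or.inl ⟨rfl, by have := h.1; omega⟩)
            (by simp [pvEnc])
          have h3 := pvStepH board N dist _ _ h2 i (j-1) _ [(i, j-1)] ((i, j-1), (i, j))
            (pvCond1 board N i (j-1) (1 ≤ j) (by omega))
            (fun h => Or.inl ⟨rfl, by have := h.1; omega⟩)
            (by simp [pvEnc])
          have h4 := pvStepH board N dist _ _ h3 i (j+1) _ [(i, j+2)] ((i, j+1), (i, j+2))
            (pvCond1 board N i (j+2) (j + 2 < N) (by omega))
            (fun h => Or.inl ⟨rfl, by have := h.1; omega⟩)
            (by simp [pvEnc, Prod.ext_iff]; omega)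
          have h5 := pvStepV board N dist _ _ h4 (i-1) j _ [(i-1, j), (i-1, j+1)]
            ((i-1, j), (i, j))
            (pvCond2 board N (i-1) j (i-1) (j+1) (1 ≤ i) (by omega))
            (fun h => Or.inr ⟨rfl, by have := h.1; omega⟩)
            (by simp [pvEnc])
          have h6 := pvStepV board N dist _ _ h5 (i-1) (j+1) _ [(i-1, j), (i-1, j+1)]
            ((i-1, j+1), (i, j+1))
            (pvCond2 board N (i-1) j (i-1) (j+1) (1 ≤ i) (by omega))
            (fun h => Or.inr ⟨rfl, by have := h.1; omega⟩)
            (by simp [pvEnc])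
          have h7 := pvStepV board N dist _ _ h6 i j _ [(i+1, j), (i+1, j+1)] ((i, j), (i+1, j))
            (pvCond2 board N (i+1) j (i+1) (j+1) (i + 1 < N) (by omega))
            (fun h => Or.inr ⟨rfl, by have := h.1; omega⟩)
            (by simp [pvEnc])
          have h8 := pvStepV board N dist _ _ h7 i (j+1) _ [(i+1, j), (i+1, j+1)]
            ((i, j+1), (i+1, j+1))
            (pvCond2 board N (i+1) j (i+1) (j+1) (i + 1 < N) (by omega))
            (fun h => Or.inr ⟨rfl, by have := h.1; omega⟩)
            (by simp [pvEnc])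
          exact ih _ _ _ _ _ h8
      · subst hd1
        simp only [loopA, loopQ]
        by_cases hgoal : i = N - 2 ∧ j = N - 1
        · rw [if_neg (by norm_num : ¬((1:Int) = 0 ∧ i = N - 1 ∧ j = N - 2)),
            if_pos ⟨trivial, hgoal⟩,
            if_pos (Or.inr (by simp [pvEnc, Prod.ext_iff]; omega) :
              (pvEnc 1 i j).1 = (N - 1, N - 1) ∨ (pvEnc 1 i j).2 = (N - 1, N - 1))]
        · rw [if_neg (by norm_num : ¬((1:Int) = 0 ∧ i = N - 1 ∧ j = N - 2)),
            if_neg (fun h => hgoal h.2),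
            if_neg (by norm_num : ¬((1:Int) = 0)),
            if_neg (by simp [pvEnc, Prod.ext_iff]; omega :
              ¬((pvEnc 1 i j).1 = (N - 1, N - 1) ∨ (pvEnc 1 i j).2 = (N - 1, N - 1)))]
          rw [show pvMoves (pvEnc 1 i j) =
              [ (((i, j-1), (i, j)),     [(i, j-1), (i+1, j-1)]),
                (((i+1, j-1), (i+1, j)), [(i, j-1), (i+1, j-1)]),
                (((i, j), (i, j+1)),     [(i, j+1), (i+1, j+1)]),
                (((i+1, j), (i+1, j+1)), [(i, j+1), (i+1, j+1)]),
                (((i, j-1), (i+1, j-1)), [(i, j-1), (i+1, j-1)]),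
                (((i, j+1), (i+1, j+1)), [(i, j+1), (i+1, j+1)]),
                (((i-1, j), (i, j)),     [(i-1, j)]),
                (((i+1, j), (i+2, j)),   [(i+2, j)]) ] from by
            simp [pvEnc, pvMoves]]
          simp only [List.foldl_cons, List.foldl_nil]
          have h1 := pvStepH board N dist _ _ h0 i (j-1) _ [(i, j-1), (i+1, j-1)]
            ((i, j-1), (i, j))
            (pvCond2 board N i (j-1) (i+1) (j-1) (1 ≤ j) (by omega))
            (fun h => Or.inl ⟨rfl, by have := h.1; omega⟩)
            (by simp [pvEnc])
          have h2 := pvStepH board N dist _ _ h1 (i+1) (j-1) _ [(i, j-1), (i+1, j-1)]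
            ((i+1, j-1), (i+1, j))
            (pvCond2 board N i (j-1) (i+1) (j-1) (1 ≤ j) (by omega))
            (fun h => Or.inl ⟨rfl, by have := h.1; omega⟩)
            (by simp [pvEnc])
          have h3 := pvStepH board N dist _ _ h2 i j _ [(i, j+1), (i+1, j+1)] ((i, j), (i, j+1))
            (pvCond2 board N i (j+1) (i+1) (j+1) (j + 1 < N) (by omega))
            (fun h => Or.inl ⟨rfl, by have := h.1; omega⟩)
            (by simp [pvEnc])
          have h4 := pvStepH board N dist _ _ h3 (i+1) j _ [(i, j+1), (i+1, j+1)]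
            ((i+1, j), (i+1, j+1))
            (pvCond2 board N i (j+1) (i+1) (j+1) (j + 1 < N) (by omega))
            (fun h => Or.inl ⟨rfl, by have := h.1; omega⟩)
            (by simp [pvEnc])
          have h5 := pvStepV board N dist _ _ h4 i (j-1) _ [(i, j-1), (i+1, j-1)]
            ((i, j-1), (i+1, j-1))
            (pvCond2 board N i (j-1) (i+1) (j-1) (1 ≤ j) (by omega))
            (fun h => Or.inr ⟨rfl, by have := h.1; omega⟩)
            (by simp [pvEnc])
          have h6 := pvStepV board N dist _ _ h5 i (j+1) _ [(i, j+1), (i+1, j+1)]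
            ((i, j+1), (i+1, j+1))
            (pvCond2 board N i (j+1) (i+1) (j+1) (j + 1 < N) (by omega))
            (fun h => Or.inr ⟨rfl, by have := h.1; omega⟩)
            (by simp [pvEnc])
          have h7 := pvStepV board N dist _ _ h6 (i-1) j _ [(i-1, j)] ((i-1, j), (i, j))
            (pvCond1 board N (i-1) j (1 ≤ i) (by omega))
            (fun h => Or.inr ⟨rfl, by have := h.1; omega⟩)
            (by simp [pvEnc])
          have h8 := pvStepV board N dist _ _ h7 (i+1) j _ [(i+2, j)] ((i+1, j), (i+2, j))
            (pvCond1 board N (i+2) j (i + 2 < N) (by omega))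
            (fun h => Or.inr ⟨rfl, by have := h.1; omega⟩)
            (by simp [pvEnc, Prod.ext_iff]; omega)
          exact ih _ _ _ _ _ h8

lemma pv_dict_init (dir i j : Int) (h : dir = 0 ∨ dir = 1) :
    (PySem.Dict.ofList [((((0:Int), (0:Int)), ((0:Int), (1:Int))), (0:Int))]).getD
        (pvEnc dir i j) pvINF =
      if dir = 0 ∧ i = 0 ∧ j = 0 then 0 else pvINF := by
  rw [show PySem.Dict.ofList [((((0:Int), (0:Int)), ((0:Int), (1:Int))), (0:Int))] =
      PySem.Dict.empty.insert (((0:Int), (0:Int)), ((0:Int), (1:Int))) 0 from rfl,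
    PySem.Dict.getD_insert]
  have hiff : (pvEnc dir i j = (((0:Int), (0:Int)), ((0:Int), (1:Int)))) ↔
      (dir = 0 ∧ i = 0 ∧ j = 0) := by
    rw [show (((0:Int), (0:Int)), ((0:Int), (1:Int))) = pvEnc 0 0 0 from by simp [pvEnc]]
    exact pvEnc_inj dir i j 0 0 0 h (Or.inl rfl)
  simp only [hiff, PySem.Dict.getD_empty]

lemma pv_init (board : List (List Int)) (hpre : Pre_solution board) :
    pvInv (board.length : Int)
      (pvSet2 (List.replicate ((board.length : Int)).toNat
          (List.replicate (((board.length : Int)) - 1).toNat pvINF)) 0 0 0,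
        List.replicate (((board.length : Int)) - 1).toNat
          (List.replicate ((board.length : Int)).toNat pvINF),
        [(0, 0, 0, 0)])
      (PySem.Dict.ofList [((((0:Int), (0:Int)), ((0:Int), (1:Int))), (0:Int))],
        [(0, ((0, 0), (0, 1)))]) := by
  have hN : (2:Int) ≤ (board.length : Int) := by exact_mod_cast hpre.1
  set N : Int := (board.length : Int) with hNdef
  have hsh0 : pvShape N (List.replicate N.toNat (List.replicate (N - 1).toNat pvINF))
      (List.replicate (N - 1).toNat (List.replicate N.toNat pvINF)) := by
    refine ⟨by simp; omega, ?_, by simp; omega, ?_⟩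
    · intro r hr; rw [List.eq_of_mem_replicate hr]; simp; omega
    · intro r hr; rw [List.eq_of_mem_replicate hr]; simp; omega
  refine ⟨pvShape_setH N _ _ 0 0 0 hsh0 le_rfl (by omega) le_rfl, ?_, ?_, ?_⟩
  · simp [pvEncQ, pvEnc]
  · intro x hx
    simp only [List.mem_singleton] at hx
    subst hx
    have h : pvInR N 0 0 0 := Or.inl ⟨rfl, by omega, by omega, by omega, by omega⟩
    exact h
  · intro dir i j hin2
    have hd2 : dir = 0 ∨ dir = 1 := by rcases hin2 with ⟨h, _⟩ | ⟨h, _⟩ <;> omega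
    rcases hd2 with h0 | h1
    · subst h0
      have hb : 0 ≤ i ∧ i < N ∧ 0 ≤ j ∧ j + 1 < N := by
        rcases hin2 with ⟨_, h⟩ | ⟨h, h2⟩
        · exact h
        · omega
      rw [pvGet2_pvSet2 _ (N - 1).toNat i j 0 0 0
        (by intro r hr; rw [List.eq_of_mem_replicate hr]; simp)
        hb.1 (by simp; omega) hb.2.2.1 (by omega) le_rfl (by simp; omega) le_rfl (by omega),
        pv_dict_init 0 i j (Or.inl rfl)]
      by_cases hij : i = 0 ∧ j = 0
      · simp [hij]
      · rw [if_neg hij, if_neg (by tauto : ¬((0:Int) = 0 ∧ i = 0 ∧ j = 0)),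
          pvGet2_repl N.toNat (N - 1).toNat pvINF i j hb.1 (by simp; omega) hb.2.2.1 (by omega)]
        simp
    · subst h1
      have hb : 0 ≤ i ∧ i + 1 < N ∧ 0 ≤ j ∧ j < N := by
        rcases hin2 with ⟨h, h2⟩ | ⟨_, h⟩
        · omega
        · exact h
      rw [pv_dict_init 1 i j (Or.inr rfl),
        pvGet2_repl (N - 1).toNat N.toNat pvINF i j hb.1 (by simp; omega) hb.2.2.1
          (by simp; omega)]
      simp

-- ---------- Step 2: the abstract queue BFS equals the reachability-closure iteration ----------

-- the closure sequence that B's loop computes: pvVisAt k = B's `reach` before round k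
def pvVisAt (board : List (List Int)) (N : Int) : Nat → PySem.Set PvSt
  | 0 => PySem.Set.ofList [pvStart]
  | k + 1 => pvStepVis board N (pvVisAt board N k)

-- "round k's set contains a goal state" (exactly B's round test)
def pvPb (board : List (List Int)) (N : Int) (k : Nat) : Bool :=
  (pvVisAt board N k).any (fun s => decide (s.1 = (N-1, N-1)) || decide (s.2 = (N-1, N-1)))

-- the common answer: the first round whose set contains a goal state
def pvFind (board : List (List Int)) : Option Int :=
  ((List.range (2 * board.length * board.length + 1)).find?
    (pvPb board (board.length))).map (fun k => ((k : Nat) : Int))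

def pvMk (D : PySem.Dict PvSt Int) (s : PvSt) : Prop := D.getD s pvINF ≠ pvINF

def pvInRangeSt (N : Int) (t : PvSt) : Prop :=
  (t.2.1 = t.1.1 ∧ t.2.2 = t.1.2 + 1 ∧ 0 ≤ t.1.1 ∧ t.1.1 < N ∧ 0 ≤ t.1.2 ∧ t.1.2 + 1 < N) ∨
  (t.2.1 = t.1.1 + 1 ∧ t.2.2 = t.1.2 ∧ 0 ≤ t.1.1 ∧ t.1.1 + 1 < N ∧ 0 ≤ t.1.2 ∧ t.1.2 < N)

-- every in-range state, listed once
def pvAllSt (n : Nat) : List PvSt :=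
  ((List.range n).flatMap fun (i : Nat) => (List.range (n-1)).map fun (j : Nat) =>
     (((i:Int), (j:Int)), ((i:Int), (j:Int)+1))) ++
  ((List.range (n-1)).flatMap fun (i : Nat) => (List.range n).map fun (j : Nat) =>
     (((i:Int), (j:Int)), ((i:Int)+1, (j:Int))))

-- potential-function weights for the fuel bound of the queue BFS
def pvW (l : Int) : Int := if l < pvINF then 10 else 1
def pvKeysLen (D : PySem.Dict PvSt Int) : Int := (D.keys.length : Int)
def pvBadLen (D : PySem.Dict PvSt Int) : Int :=
  ((D.items.filter (fun p => p.2 == pvINF)).length : Int)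
def pvPhi (C : Int) (D : PySem.Dict PvSt Int) (q : List (Int × PvSt)) : Int :=
  (q.map (fun x => pvW x.1)).sum + 20 * (C - pvKeysLen D) + 10 * pvBadLen D

-- the queue-BFS invariant against the closure sequence: mid-level d, L1 holds the still
-- unprocessed level-d entries and L2 the level-(d+1) entries discovered so far
def pvQInv (board : List (List Int)) (N : Int) (d : Nat)
    (D : PySem.Dict PvSt Int) (L1 L2 : List (Int × PvSt)) : Prop :=
  (∀ x ∈ L1, x.1 = (d : Int) ∧ x.2 ∈ pvVisAt board N d) ∧
  (∀ x ∈ L2, x.1 = (d : Int) + 1 ∧ x.2 ∈ pvVisAt board N (d+1)) ∧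
  (∀ s, pvMk D s → s ∈ pvVisAt board N d ∨ s ∈ L2.map (·.2)) ∧
  (∀ s ∈ pvVisAt board N (d+1), s ∈ pvVisAt board N d ∨ s ∈ L2.map (·.2) ∨
    ∃ x ∈ L1, s ∈ pvNbrs board N x.2) ∧
  (∀ s ∈ pvVisAt board N d, (s.1 = (N-1, N-1) ∨ s.2 = (N-1, N-1)) → s ∈ L1.map (·.2)) ∧
  (D.keys.Nodup ∧ ∀ s ∈ D.keys, pvInRangeSt N s)

lemma mem_pvNbrs (board : List (List Int)) (N : Int) (s t : PvSt) :
    t ∈ pvNbrs board N s ↔ ∃ m ∈ pvMoves s, m.1 = t ∧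
      (m.2.all (fun c => pvEmpty board N c.1 c.2)) = true := by
  unfold pvNbrs
  rw [List.mem_map]
  constructor
  · rintro ⟨m, hm, rfl⟩
    rw [List.mem_filter] at hm
    exact ⟨m, hm.1, rfl, hm.2⟩
  · rintro ⟨m, hm, h1, h2⟩
    exact ⟨m, List.mem_filter.mpr ⟨hm, h2⟩, h1⟩

lemma mem_pvVisAt_succ (board : List (List Int)) (N : Int) (k : Nat) (t : PvSt) :
    t ∈ pvVisAt board N (k+1) ↔
      t ∈ pvVisAt board N k ∨ ∃ s ∈ pvVisAt board N k, t ∈ pvNbrs board N s := by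
  show t ∈ pvStepVis board N (pvVisAt board N k) ↔ _
  rw [pvStepVis, PySem.Set.mem_union, List.mem_flatMap]

lemma pvVisAt_mono (board : List (List Int)) (N : Int) {k m : Nat} (h : k ≤ m) {t : PvSt}
    (ht : t ∈ pvVisAt board N k) : t ∈ pvVisAt board N m := by
  induction m, h using Nat.le_induction with
  | base => exact ht
  | succ m hm ihm => exact (mem_pvVisAt_succ board N m t).mpr (Or.inl ihm)

-- a stabilised closure stays the same set forever
lemma pvStable (board : List (List Int)) (N : Int) (k : Nat)
    (h : ∀ t, t ∈ pvVisAt board N (k+1) ↔ t ∈ pvVisAt board N k) :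
    ∀ m, k ≤ m → ∀ t, t ∈ pvVisAt board N m ↔ t ∈ pvVisAt board N k := by
  intro m hm
  induction m, hm using Nat.le_induction with
  | base => exact fun t => Iff.rfl
  | succ m hm ih =>
    intro t
    rw [mem_pvVisAt_succ]
    constructor
    · rintro (h1 | ⟨s, hs, hnb⟩)
      · exact (ih t).mp h1
      · exact (h t).mp ((mem_pvVisAt_succ board N k t).mpr (Or.inr ⟨s, (ih s).mp hs, hnb⟩))
    · intro h1
      exact Or.inl ((ih t).mpr h1)

lemma pvNbrs_inRange (board : List (List Int)) (N : Int) (s t : PvSt)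
    (ht : t ∈ pvNbrs board N s) (hs : pvInRangeSt N s) : pvInRangeSt N t := by
  rw [mem_pvNbrs] at ht
  obtain ⟨m, hm, hmt, hcond⟩ := ht
  subst hmt
  rcases s with ⟨⟨a, b⟩, ⟨c, dd⟩⟩
  simp only [pvInRangeSt] at hs ⊢
  by_cases hac : a = c
  · subst hac
    simp [pvMoves] at hm
    rcases hm with rfl | rfl | rfl | rfl | rfl | rfl | rfl | rfl <;>
      simp only [List.all_cons, List.all_nil, Bool.and_eq_true, pvEmpty,
        decide_eq_true_eq, and_true] at hcond <;> dsimp only at hcond hs ⊢ <;> omega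
  · simp [pvMoves, hac] at hm
    rcases hm with rfl | rfl | rfl | rfl | rfl | rfl | rfl | rfl <;>
      simp only [List.all_cons, List.all_nil, Bool.and_eq_true, pvEmpty,
        decide_eq_true_eq, and_true] at hcond <;> dsimp only at hcond hs ⊢ <;> omega

lemma pvVisAt_inRange (board : List (List Int)) (n : Nat) (hn : 2 ≤ n) (k : Nat) (t : PvSt)
    (ht : t ∈ pvVisAt board (n : Int) k) : pvInRangeSt (n : Int) t := by
  induction k generalizing t with
  | zero =>
    have : t = pvStart := by
      simpa [pvVisAt, PySem.Set.mem_ofList] using ht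
    subst this
    left
    simp only [pvStart]
    norm_num
    omega
  | succ k ih =>
    rcases (mem_pvVisAt_succ board (n : Int) k t).mp ht with h | ⟨s, hs, hnb⟩
    · exact ih t h
    · exact pvNbrs_inRange board (n : Int) s t hnb (ih s hs)

lemma mem_pvAllSt (n : Nat) (t : PvSt) (ht : pvInRangeSt (n : Int) t) : t ∈ pvAllSt n := by
  rcases t with ⟨⟨x, y⟩, ⟨z, w⟩⟩
  rcases ht with ⟨h1, h2, h3, h4, h5, h6⟩ | ⟨h1, h2, h3, h4, h5, h6⟩ <;>
    dsimp only at h1 h2 h3 h4 h5 h6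
  · rw [h1, h2]
    apply List.mem_append_left
    rw [List.mem_flatMap]
    refine ⟨x.toNat, by rw [List.mem_range]; omega, ?_⟩
    rw [List.mem_map]
    refine ⟨y.toNat, by rw [List.mem_range]; omega, ?_⟩
    have hx : (x.toNat : Int) = x := Int.toNat_of_nonneg h3
    have hy : (y.toNat : Int) = y := Int.toNat_of_nonneg h5
    rw [hx, hy]
  · rw [h1, h2]
    apply List.mem_append_right
    rw [List.mem_flatMap]
    refine ⟨x.toNat, by rw [List.mem_range]; omega, ?_⟩
    rw [List.mem_map]
    refine ⟨y.toNat, by rw [List.mem_range]; omega, ?_⟩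
    have hx : (x.toNat : Int) = x := Int.toNat_of_nonneg h3
    have hy : (y.toNat : Int) = y := Int.toNat_of_nonneg h5
    rw [hx, hy]

lemma pvSumConst (a bl : Nat) : ((List.range a).map (fun _ => bl)).sum = a * bl := by
  induction a with
  | zero => simp
  | succ a ih => rw [List.range_succ, List.map_append, List.sum_append, ih]; simp [Nat.succ_mul]

lemma pvAllSt_len (n : Nat) : (pvAllSt n).length ≤ 2 * n * n := by
  have h1 : (((List.range n).flatMap fun (i : Nat) => (List.range (n-1)).map fun (j : Nat) =>
      ((((i:Int), (j:Int)), ((i:Int), (j:Int)+1)) : PvSt)).length) = n * (n-1) := by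
    rw [List.length_flatMap]
    rw [show ((List.range n).map fun (i : Nat) => ((List.range (n-1)).map fun (j : Nat) =>
        ((((i:Int), (j:Int)), ((i:Int), (j:Int)+1)) : PvSt)).length)
      = (List.range n).map (fun _ => n - 1) from List.map_congr_left (by simp)]
    exact pvSumConst n (n-1)
  have h2 : (((List.range (n-1)).flatMap fun (i : Nat) => (List.range n).map fun (j : Nat) =>
      ((((i:Int), (j:Int)), ((i:Int)+1, (j:Int))) : PvSt)).length) = (n-1) * n := by
    rw [List.length_flatMap]
    rw [show ((List.range (n-1)).map fun (i : Nat) => ((List.range n).map fun (j : Nat) =>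
        ((((i:Int), (j:Int)), ((i:Int)+1, (j:Int))) : PvSt)).length)
      = (List.range (n-1)).map (fun _ => n) from List.map_congr_left (by simp)]
    exact pvSumConst (n-1) n
  have hle : n * (n-1) ≤ n * n := Nat.mul_le_mul_left n (by omega)
  have hle2 : (n-1) * n ≤ n * n := Nat.mul_le_mul_right n (by omega)
  calc (pvAllSt n).length = n * (n-1) + (n-1) * n := by
        rw [pvAllSt, List.length_append, h1, h2]
    _ ≤ 2 * n * n := by
        have h3 : 2 * n * n = n * n + n * n := by ring
        omega

-- a duplicate-free list of in-range states has at most |pvAllSt n| elements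
lemma pvCard_le (n : Nat) (l : List PvSt) (hnd : l.Nodup)
    (hin : ∀ t ∈ l, pvInRangeSt (n : Int) t) : l.length ≤ (pvAllSt n).length := by
  have h1 : l.toFinset.card = l.length := List.toFinset_card_of_nodup hnd
  have h2 : l.toFinset ⊆ (pvAllSt n).toFinset := by
    intro t ht
    rw [List.mem_toFinset] at ht ⊢
    exact mem_pvAllSt n t (hin t ht)
  calc l.length = l.toFinset.card := h1.symm
    _ ≤ (pvAllSt n).toFinset.card := Finset.card_le_card h2
    _ ≤ (pvAllSt n).length := (pvAllSt n).toFinset_card_le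

lemma pvPb_iff (board : List (List Int)) (N : Int) (j : Nat) :
    pvPb board N j = true ↔ ∃ s ∈ pvVisAt board N j,
      (s.1 = (N-1, N-1) ∨ s.2 = (N-1, N-1)) := by
  simp only [pvPb, List.any_eq_true, Bool.or_eq_true, decide_eq_true_eq]

-- while no goal round has been reached, each closure round adds a state
lemma pvLevel_lt (board : List (List Int)) (n : Nat) (hn : 2 ≤ n) (d : Nat)
    (hP : pvPb board (n : Int) d = true)
    (hmin : ∀ j, j < d → pvPb board (n : Int) j = false) :
    d < 2 * n * n + 1 := by
  have hgrow : ∀ k, k < d →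
      ∃ t, t ∈ pvVisAt board (n : Int) (k+1) ∧ t ∉ pvVisAt board (n : Int) k := by
    intro k hk
    by_contra hcon
    push Not at hcon
    have heq : ∀ t, t ∈ pvVisAt board (n : Int) (k+1) ↔ t ∈ pvVisAt board (n : Int) k :=
      fun t => ⟨fun h => hcon t h, fun h => pvVisAt_mono board _ (Nat.le_succ k) h⟩
    have hst := pvStable board (n : Int) k heq d (by omega)
    obtain ⟨s, hs, hgoal⟩ := (pvPb_iff board (n : Int) d).mp hP
    have hk' : pvPb board (n : Int) k = true :=
      (pvPb_iff board (n : Int) k).mpr ⟨s, (hst s).mp hs, hgoal⟩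
    rw [hmin k hk] at hk'
    exact absurd hk' (by simp)
  have hcard : ∀ k, k ≤ d → k + 1 ≤ (pvVisAt board (n : Int) k).toFinset.card := by
    intro k
    induction k with
    | zero =>
      intro _
      have hmem : pvStart ∈ (pvVisAt board (n : Int) 0).toFinset := by
        rw [List.mem_toFinset]
        simp [pvVisAt, PySem.Set.mem_ofList]
      have := Finset.card_pos.mpr ⟨pvStart, hmem⟩
      omega
    | succ k ih =>
      intro hkd
      have h1 := ih (by omega)
      obtain ⟨t, ht1, ht2⟩ := hgrow k (by omega)
      have hss : (pvVisAt board (n : Int) k).toFinset ⊂ (pvVisAt board (n : Int) (k+1)).toFinset := by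
        rw [Finset.ssubset_def]
        constructor
        · intro u hu
          rw [List.mem_toFinset] at hu ⊢
          exact pvVisAt_mono board _ (Nat.le_succ k) hu
        · intro hsub
          have := hsub (List.mem_toFinset.mpr ht1)
          rw [List.mem_toFinset] at this
          exact ht2 this
      have := Finset.card_lt_card hss
      omega
  have h1 := hcard d le_rfl
  have h2 : (pvVisAt board (n : Int) d).toFinset.card ≤ (pvAllSt n).length := by
    have hsub : (pvVisAt board (n : Int) d).toFinset ⊆ (pvAllSt n).toFinset := by
      intro t ht
      rw [List.mem_toFinset] at ht ⊢
      exact mem_pvAllSt n t (pvVisAt_inRange board n hn d t ht)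
    exact le_trans (Finset.card_le_card hsub) (pvAllSt n).toFinset_card_le
  have h3 := pvAllSt_len n
  omega

lemma pvFind_range'_some (p : Nat → Bool) (j : Nat) (hj : p j = true)
    (hmin : ∀ i, i < j → p i = false) :
    ∀ (r k : Nat), k ≤ j → j < k + r → (List.range' k r).find? p = some j := by
  intro r
  induction r with
  | zero => intro k h1 h2; exact absurd h2 (by omega)
  | succ r ih =>
    intro k h1 h2
    rw [List.range'_succ]
    by_cases hpk : p k = true
    · have hkj : k = j := by
        rcases Nat.lt_or_ge k j with h | h
        · rw [hmin k h] at hpk; exact absurd hpk (by simp)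
        · omega
      subst hkj
      rw [List.find?_cons_of_pos hpk]
    · rw [List.find?_cons_of_neg hpk]
      have hkj : k ≠ j := fun h => hpk (h ▸ hj)
      exact ih (k+1) (by omega) (by omega)

lemma pvMoves_length (s : PvSt) : (pvMoves s).length = 8 := by
  rcases s with ⟨⟨a, b⟩, ⟨c, d⟩⟩
  by_cases h : a = c <;> simp [pvMoves, h]

-- replacing the (unique) value stored at a key changes the INF-count accordingly
lemma pvFilter_replace (ns : PvSt) (v : Int) :
    ∀ (l : List (PvSt × Int)), (l.map Prod.fst).Nodup → (ns, pvINF) ∈ l →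
    ((l.map (fun p => if p.1 == ns then (ns, v) else p)).filter
        (fun p => p.2 == pvINF)).length + 1
      = (l.filter (fun p => p.2 == pvINF)).length + (if v = pvINF then 1 else 0) := by
  intro l
  induction l with
  | nil => intro _ h; simp at h
  | cons p l ih =>
    intro hnd hmem
    rw [List.map_cons] at hnd
    obtain ⟨hp1, hnd'⟩ := List.nodup_cons.mp hnd
    by_cases hpns : p.1 = ns
    · have hpl : p = (ns, pvINF) := by
        rcases List.mem_cons.mp hmem with h | h
        · exact h.symm
        · exact absurd (hpns ▸ List.mem_map.mpr ⟨_, h, rfl⟩) hp1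
      subst hpl
      have htail : l.map (fun q => if q.1 == ns then (ns, v) else q) = l := by
        have hid : ∀ q ∈ l, (if q.1 == ns then (ns, v) else q) = q := by
          intro q hq
          rw [if_neg]
          simp only [beq_iff_eq]
          intro h
          exact hp1 (h ▸ List.mem_map.mpr ⟨q, hq, rfl⟩)
        rw [List.map_congr_left hid, List.map_id']
      rw [List.map_cons, htail]
      have hhead : ((if (((ns, pvINF) : PvSt × Int).1 == ns) = true then ((ns, v) : PvSt × Int)
          else (ns, pvINF))) = (ns, v) := by simp
      rw [hhead, List.filter_cons, List.filter_cons]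
      have hINF : ((((ns, pvINF) : PvSt × Int).2 == pvINF) = true) := by simp
      rw [if_pos hINF]
      by_cases hv : v = pvINF
      · rw [if_pos (by simp [hv]), if_pos hv]
        simp
      · rw [if_neg (by simp [hv]), if_neg hv]
        simp
    · have hmem' : (ns, pvINF) ∈ l := by
        rcases List.mem_cons.mp hmem with h | h
        · exact absurd (by rw [← h]) hpns
        · exact h
      have ihr := ih hnd' hmem'
      have hheadmap : ((if (p.1 == ns) = true then ((ns, v) : PvSt × Int) else p)) = p :=
        if_neg (by simp only [beq_iff_eq]; exact hpns)
      rw [List.map_cons, hheadmap, List.filter_cons, List.filter_cons]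
      by_cases hpi : (p.2 == pvINF) = true
      · rw [if_pos hpi, if_pos hpi]
        simp only [List.length_cons]
        omega
      · rw [if_neg hpi, if_neg hpi]
        omega

-- the potential drops by enough at every guarded enqueue
lemma pvPhi_insert (C : Int) (D : PySem.Dict PvSt Int) (q : List (Int × PvSt))
    (ns : PvSt) (v : Int) (hnd : D.keys.Nodup) (h : D.getD ns pvINF = pvINF) :
    pvPhi C (D.insert ns v) (q ++ [(v, ns)]) ≤
      pvPhi C D q + (if v = pvINF then 1 else 0) := by
  have hsum : ((q ++ [(v, ns)]).map (fun x => pvW x.1)).sum =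
      (q.map (fun x => pvW x.1)).sum + pvW v := by
    rw [List.map_append, List.sum_append]; simp
  by_cases hc : D.contains ns = true
  · -- overwrite: the stored value was pvINF
    have hget : D.get? ns = some pvINF := by
      rcases hget2 : D.get? ns with _ | w
      · rw [PySem.Dict.contains_eq_isSome_get?, hget2] at hc; simp at hc
      · rw [PySem.Dict.getD_eq_get?_getD, hget2] at h
        simp only [Option.getD_some] at h
        rw [h]
    have hitems : (ns, pvINF) ∈ D.items := PySem.Dict.mem_items_of_get?_eq_some D hget
    have hkeys : (D.insert ns v).keys = D.keys := PySem.Dict.keys_insert_of_contains D v hc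
    have hitems' : (D.insert ns v).items =
        D.items.map (fun p => if p.1 == ns then (ns, v) else p) :=
      PySem.Dict.items_insert_of_contains D v hc
    have hndi : (D.items.map Prod.fst).Nodup := by
      have : D.keys = D.items.map Prod.fst := rfl
      rwa [this] at hnd
    have hbad := pvFilter_replace ns v D.items hndi hitems
    unfold pvPhi pvKeysLen pvBadLen
    rw [hkeys, hitems', hsum]
    have hwv : 1 ≤ pvW v ∧ pvW v ≤ 10 ∧ (v = pvINF → pvW v = 1) := by
      unfold pvW
      constructor
      · split_ifs <;> omega
      constructor
      · split_ifs <;> omega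
      · intro hv; subst hv; rw [if_neg (by omega)]
    by_cases hv : v = pvINF
    · rw [if_pos hv] at hbad ⊢
      have := hwv.2.2 hv
      omega
    · rw [if_neg hv] at hbad ⊢
      omega
  · -- fresh key
    have hc' : D.contains ns = false := by simpa using hc
    have hkeys : (D.insert ns v).keys = D.keys ++ [ns] :=
      PySem.Dict.keys_insert_of_not_contains D v hc'
    have hitems' : (D.insert ns v).items = D.items ++ [(ns, v)] :=
      PySem.Dict.items_insert_of_not_contains D v hc'
    unfold pvPhi pvKeysLen pvBadLen
    rw [hkeys, hitems', hsum, List.filter_append, List.length_append, List.length_append]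
    rw [List.filter_cons, List.filter_nil]
    have hwv : 1 ≤ pvW v ∧ pvW v ≤ 10 ∧ (v = pvINF → pvW v = 1) := by
      unfold pvW
      constructor
      · split_ifs <;> omega
      constructor
      · split_ifs <;> omega
      · intro hv; subst hv; rw [if_neg (by omega)]
    by_cases hv : v = pvINF
    · rw [if_pos (by simp [hv]), if_pos hv]
      have := hwv.2.2 hv
      simp only [List.length_cons, List.length_nil]
      push_cast
      omega
    · rw [if_neg (by simp [hv]), if_neg hv]
      have h1 := hwv.1
      have h2 := hwv.2.1
      simp only [List.length_cons, List.length_nil]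
      push_cast
      omega

-- everything the enqueue fold over one popped state's moves does
lemma pvFold_spec (board : List (List Int)) (N dist : Int) (C : Int) :
    ∀ (ms : List (PvSt × List (Int × Int))) (D : PySem.Dict PvSt Int) (q : List (Int × PvSt)),
      D.keys.Nodup →
      ∃ new : List (Int × PvSt),
        (ms.foldl (pvTryB board N dist) (D, q)).2 = q ++ new ∧
        (∀ y ∈ new, y.1 = dist + 1 ∧
          ∃ m ∈ ms, y.2 = m.1 ∧ (m.2.all (fun c => pvEmpty board N c.1 c.2)) = true) ∧
        (∀ t, pvMk (ms.foldl (pvTryB board N dist) (D, q)).1 t →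
          pvMk D t ∨ t ∈ new.map (·.2)) ∧
        (∀ m ∈ ms, (m.2.all (fun c => pvEmpty board N c.1 c.2)) = true →
          pvMk D m.1 ∨ m.1 ∈ new.map (·.2)) ∧
        (ms.foldl (pvTryB board N dist) (D, q)).1.keys.Nodup ∧
        (∀ t ∈ (ms.foldl (pvTryB board N dist) (D, q)).1.keys,
          t ∈ D.keys ∨ t ∈ new.map (·.2)) ∧
        pvPhi C (ms.foldl (pvTryB board N dist) (D, q)).1
            (ms.foldl (pvTryB board N dist) (D, q)).2 ≤
          pvPhi C D q + (ms.length : Int) * (if dist + 1 = pvINF then 1 else 0) := by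
  intro ms
  induction ms with
  | nil =>
    intro D q hnd
    exact ⟨[], by simp, by simp, fun t ht => Or.inl ht, by simp, hnd,
      fun t ht => Or.inl ht, by simp⟩
  | cons m ms ih =>
    intro D q hnd
    rw [List.foldl_cons]
    by_cases hc1 : ((m.2.all (fun c => pvEmpty board N c.1 c.2)) = true ∧
        D.getD m.1 pvINF = pvINF)
    · have hstep : pvTryB board N dist (D, q) m =
          (D.insert m.1 (dist + 1), q ++ [(dist + 1, m.1)]) := by
        unfold pvTryB
        rw [if_pos hc1]
      rw [hstep]
      obtain ⟨new', hq', hnew', hmk', hcov', hnd2, hkeys', hphi'⟩ :=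
        ih (D.insert m.1 (dist + 1)) (q ++ [(dist + 1, m.1)])
          (PySem.Dict.nodup_keys_insert D m.1 (dist + 1) hnd)
      refine ⟨(dist + 1, m.1) :: new', ?_, ?_, ?_, ?_, hnd2, ?_, ?_⟩
      · rw [hq']
        simp
      · intro y hy
        rcases List.mem_cons.mp hy with rfl | hy
        · exact ⟨rfl, m, List.mem_cons_self, rfl, hc1.1⟩
        · obtain ⟨hy1, m', hm', hym, hall⟩ := hnew' y hy
          exact ⟨hy1, m', List.mem_cons_of_mem _ hm', hym, hall⟩
      · intro t ht
        rcases hmk' t ht with h | h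
        · by_cases htm : t = m.1
          · right
            rw [htm, List.map_cons]
            exact List.mem_cons_self
          · left
            unfold pvMk at h ⊢
            rw [PySem.Dict.getD_insert, if_neg htm] at h
            exact h
        · right
          rw [List.map_cons]
          exact List.mem_cons_of_mem _ h
      · intro m' hm' hall
        rcases List.mem_cons.mp hm' with rfl | hm'
        · right
          rw [List.map_cons]
          exact List.mem_cons_self
        · rcases hcov' m' hm' hall with h | h
          · by_cases htm : m'.1 = m.1
            · right
              rw [List.map_cons, htm]
              exact List.mem_cons_self
            · left
              unfold pvMk at h ⊢
              rw [PySem.Dict.getD_insert, if_neg htm] at h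
              exact h
          · right
            rw [List.map_cons]
            exact List.mem_cons_of_mem _ h
      · intro t ht
        rcases hkeys' t ht with h | h
        · rcases (PySem.Dict.mem_keys_insert D m.1 t (dist + 1)).mp h with rfl | h
          · right
            rw [List.map_cons]
            exact List.mem_cons_self
          · left
            exact h
        · right
          rw [List.map_cons]
          exact List.mem_cons_of_mem _ h
      · have hpi := pvPhi_insert C D q m.1 (dist + 1) hnd hc1.2
        have hlen : (((m :: ms).length : Nat) : Int) = (ms.length : Int) + 1 := by
          push_cast [List.length_cons]
          ring
        rw [hlen]
        have hexp : ((ms.length : Int) + 1) * (if dist + 1 = pvINF then 1 else 0) =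
            (ms.length : Int) * (if dist + 1 = pvINF then 1 else 0) +
              (if dist + 1 = pvINF then 1 else 0) := by ring
        rw [hexp]
        linarith [hphi', hpi]
    · have hstep : pvTryB board N dist (D, q) m = (D, q) := by
        unfold pvTryB
        rw [if_neg hc1]
      rw [hstep]
      obtain ⟨new', hq', hnew', hmk', hcov', hnd2, hkeys', hphi'⟩ := ih D q hnd
      refine ⟨new', hq', ?_, hmk', ?_, hnd2, hkeys', ?_⟩
      · intro y hy
        obtain ⟨hy1, m', hm', hym, hall⟩ := hnew' y hy
        exact ⟨hy1, m', List.mem_cons_of_mem _ hm', hym, hall⟩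
      · intro m' hm' hall
        rcases List.mem_cons.mp hm' with rfl | hm'
        · exact Or.inl (fun hEq => hc1 ⟨hall, hEq⟩)
        · exact hcov' m' hm' hall
      · have hb : (0:Int) ≤ (if dist + 1 = pvINF then 1 else 0) := by
          split_ifs <;> omega
        have hlen : (((m :: ms).length : Nat) : Int) = (ms.length : Int) + 1 := by
          push_cast [List.length_cons]
          ring
        rw [hlen]
        nlinarith [hphi', hb]

lemma pvPhi_nonneg (n : Nat) (D : PySem.Dict PvSt Int) (q : List (Int × PvSt))
    (hnd : D.keys.Nodup) (hin : ∀ s ∈ D.keys, pvInRangeSt (n : Int) s) :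
    0 ≤ pvPhi ((pvAllSt n).length : Int) D q := by
  unfold pvPhi
  have h1 : 0 ≤ (q.map (fun x => pvW x.1)).sum := by
    apply List.sum_nonneg
    intro a ha
    obtain ⟨x, hx, rfl⟩ := List.mem_map.mp ha
    unfold pvW
    split_ifs <;> omega
  have h2 : pvKeysLen D ≤ ((pvAllSt n).length : Int) := by
    unfold pvKeysLen
    exact_mod_cast pvCard_le n D.keys hnd hin
  have h3 : 0 ≤ pvBadLen D := by
    unfold pvBadLen
    positivity
  linarith

-- exhausting level d shifts the invariant one level up
lemma pvShift (board : List (List Int)) (N : Int) (d : Nat)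
    (D : PySem.Dict PvSt Int) (L2 : List (Int × PvSt))
    (hInv : pvQInv board N d D [] L2) :
    pvQInv board N (d+1) D L2 [] ∧ pvPb board N d = false := by
  obtain ⟨h1, h2, h3, h4, h5, h6⟩ := hInv
  have hPd : pvPb board N d = false := by
    rcases hcon : pvPb board N d with _ | _
    · rfl
    · obtain ⟨s, hs, hg⟩ := (pvPb_iff board N d).mp hcon
      have := h5 s hs hg
      simp at this
  refine ⟨⟨?_, ?_, ?_, ?_, ?_, h6⟩, hPd⟩
  · intro x hx
    obtain ⟨hx1, hx2⟩ := h2 x hx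
    refine ⟨by rw [hx1]; push_cast; ring, hx2⟩
  · intro x hx
    simp at hx
  · intro s hM
    rcases h3 s hM with h | h
    · exact Or.inl (pvVisAt_mono board N (Nat.le_succ d) h)
    · obtain ⟨x, hx, rfl⟩ := List.mem_map.mp h
      exact Or.inl (h2 x hx).2
  · intro s hs
    rcases (mem_pvVisAt_succ board N (d+1) s).mp hs with h | ⟨p, hp, hnb⟩
    · exact Or.inl h
    · rcases h4 p hp with hpd | hpL | ⟨x, hx, _⟩
      · exact Or.inl ((mem_pvVisAt_succ board N d s).mpr (Or.inr ⟨p, hpd, hnb⟩))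
      · obtain ⟨x, hx, rfl⟩ := List.mem_map.mp hpL
        exact Or.inr (Or.inr ⟨x, hx, hnb⟩)
      · simp at hx
  · intro s hs hg
    rcases h4 s hs with h | h | ⟨x, hx, _⟩
    · have := h5 s h hg
      simp at this
    · exact h
    · simp at hx

-- processing the head of L1 (the pop case), assuming the statement for smaller fuel
lemma pvPop (board : List (List Int)) (n : Nat) (hn : 2 ≤ n) (hlen : board.length = n)
    (f : Nat)
    (ih : ∀ (d : Nat) (D : PySem.Dict PvSt Int) (L1 L2 : List (Int × PvSt)),
      pvQInv board (n : Int) d D L1 L2 →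
      (∀ j, j < d → pvPb board (n : Int) j = false) →
      pvPhi ((pvAllSt n).length : Int) D (L1 ++ L2) + 1 ≤ (f : Int) →
      loopQ board (n : Int) D (L1 ++ L2) f = pvFind board)
    (d : Nat) (D : PySem.Dict PvSt Int) (x : Int × PvSt) (R L2 : List (Int × PvSt))
    (hInv : pvQInv board (n : Int) d D (x :: R) L2)
    (hmin : ∀ j, j < d → pvPb board (n : Int) j = false)
    (hphi : pvPhi ((pvAllSt n).length : Int) D ((x :: R) ++ L2) + 1 ≤ ((f : Int) + 1)) :
    loopQ board (n : Int) D ((x :: R) ++ L2) (f + 1) = pvFind board := by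
  obtain ⟨h1, h2, h3, h4, h5, h6⟩ := hInv
  obtain ⟨hx1, hx2⟩ := h1 x List.mem_cons_self
  obtain ⟨dist, sst⟩ := x
  dsimp only at hx1 hx2
  by_cases hg : sst.1 = ((n:Int) - 1, (n:Int) - 1) ∨ sst.2 = ((n:Int) - 1, (n:Int) - 1)
  · have hloop : loopQ board (n:Int) D (((dist, sst) :: R) ++ L2) (f+1) = some dist := by
      simp only [List.cons_append, loopQ]
      rw [if_pos hg]
    rw [hloop]
    have hPd : pvPb board (n:Int) d = true := (pvPb_iff board (n:Int) d).mpr ⟨sst, hx2, hg⟩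
    have hdlt := pvLevel_lt board n hn d hPd hmin
    unfold pvFind
    rw [hlen, List.range_eq_range',
      pvFind_range'_some (pvPb board (n:Int)) d hPd hmin (2*n*n+1) 0 (by omega) (by omega)]
    simp only [Option.map_some]
    rw [hx1]
  · have hloop : loopQ board (n:Int) D (((dist, sst) :: R) ++ L2) (f+1)
        = loopQ board (n:Int)
            ((pvMoves sst).foldl (pvTryB board (n:Int) dist) (D, R ++ L2)).1
            ((pvMoves sst).foldl (pvTryB board (n:Int) dist) (D, R ++ L2)).2 f := by
      simp only [List.cons_append, loopQ]
      rw [if_neg hg]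
    rw [hloop]
    obtain ⟨new, hq', hnew, hmk', hcov, hnd', hkeys', hphi'⟩ :=
      pvFold_spec board (n:Int) dist ((pvAllSt n).length : Int) (pvMoves sst) D (R ++ L2)
        h6.1
    have happ : ((pvMoves sst).foldl (pvTryB board (n:Int) dist) (D, R ++ L2)).2
        = R ++ (L2 ++ new) := by rw [hq', List.append_assoc]
    rw [happ]
    refine ih d _ R (L2 ++ new) ⟨?_, ?_, ?_, ?_, ?_, hnd', ?_⟩ hmin ?_
    · exact fun y hy => h1 y (List.mem_cons_of_mem _ hy)
    · intro y hy
      rcases List.mem_append.mp hy with hy | hy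
      · exact h2 y hy
      · obtain ⟨hy1, m, hmm, hym, hall⟩ := hnew y hy
        have hynb : y.2 ∈ pvNbrs board (n:Int) sst :=
          (mem_pvNbrs board (n:Int) sst y.2).mpr ⟨m, hmm, hym.symm, hall⟩
        refine ⟨by rw [hy1, hx1], ?_⟩
        exact (mem_pvVisAt_succ board (n:Int) d y.2).mpr (Or.inr ⟨sst, hx2, hynb⟩)
    · intro t hM
      rcases hmk' t hM with h | h
      · rcases h3 t h with h' | h'
        · exact Or.inl h'
        · right; rw [List.map_append]; exact List.mem_append_left _ h'
      · right; rw [List.map_append]; exact List.mem_append_right _ h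
    · intro t htv
      rcases h4 t htv with h | h | ⟨y, hy, hnb⟩
      · exact Or.inl h
      · right; left; rw [List.map_append]; exact List.mem_append_left _ h
      · rcases List.mem_cons.mp hy with rfl | hy
        · obtain ⟨m, hmm, hm1, hall⟩ := (mem_pvNbrs board (n:Int) sst t).mp hnb
          rcases hcov m hmm hall with h' | h'
          · rw [hm1] at h'
            rcases h3 t h' with h'' | h''
            · exact Or.inl h''
            · right; left; rw [List.map_append]; exact List.mem_append_left _ h''
          · right; left; rw [List.map_append]
            exact List.mem_append_right _ (hm1 ▸ h')
        · exact Or.inr (Or.inr ⟨y, hy, hnb⟩)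
    · intro t htv hgt
      have hmem := h5 t htv hgt
      rw [List.map_cons] at hmem
      rcases List.mem_cons.mp hmem with h | h
      · rw [h] at hgt
        exact absurd hgt hg
      · exact h
    · intro t ht
      rcases hkeys' t ht with h | h
      · exact h6.2 t h
      · obtain ⟨y, hy, rfl⟩ := List.mem_map.mp h
        obtain ⟨hy1, m, hmm, hym, hall⟩ := hnew y hy
        have hynb : y.2 ∈ pvNbrs board (n:Int) sst :=
          (mem_pvNbrs board (n:Int) sst y.2).mpr ⟨m, hmm, hym.symm, hall⟩
        exact pvNbrs_inRange board (n:Int) sst y.2 hynb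
          (pvVisAt_inRange board n hn d sst hx2)
    · -- the potential dropped by at least one
      have hwd : 1 + 8 * (if dist + 1 = pvINF then (1:Int) else 0) ≤ pvW dist := by
        unfold pvW pvINF
        norm_num
        by_cases hd1 : dist + 1 = 10000
        · rw [if_pos hd1, if_pos (by omega)]
          norm_num
        · rw [if_neg hd1]
          split_ifs <;> omega
      have hcons : pvPhi ((pvAllSt n).length : Int) D (((dist, sst) :: R) ++ L2)
          = pvW dist + pvPhi ((pvAllSt n).length : Int) D (R ++ L2) := by
        unfold pvPhi
        rw [List.cons_append, List.map_cons, List.sum_cons]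
        ring
      have hml : (((pvMoves sst).length : Nat) : Int) = 8 := by
        rw [pvMoves_length]; norm_num
      rw [hml, happ] at hphi'
      rw [hcons] at hphi
      linarith

lemma pvLoopQ_eq (board : List (List Int)) (n : Nat) (hn : 2 ≤ n) (hlen : board.length = n) :
    ∀ (fuel : Nat) (d : Nat) (D : PySem.Dict PvSt Int) (L1 L2 : List (Int × PvSt)),
      pvQInv board (n : Int) d D L1 L2 →
      (∀ j, j < d → pvPb board (n : Int) j = false) →
      pvPhi ((pvAllSt n).length : Int) D (L1 ++ L2) + 1 ≤ (fuel : Int) →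
      loopQ board (n : Int) D (L1 ++ L2) fuel = pvFind board := by
  intro fuel
  induction fuel with
  | zero =>
    intro d D L1 L2 hInv hmin hphi
    exfalso
    have h0 := pvPhi_nonneg n D (L1 ++ L2) hInv.2.2.2.2.2.1 hInv.2.2.2.2.2.2
    push_cast at hphi
    linarith
  | succ f ihf =>
    intro d D L1 L2 hInv hmin hphi
    rcases L1 with _ | ⟨x, R⟩
    · rcases L2 with _ | ⟨y, R2⟩
      · -- empty queue: A ends with None; no round ever contains a goal
        obtain ⟨h1, h2, h3, h4, h5, h6⟩ := hInv
        have hstab : ∀ t, t ∈ pvVisAt board (n:Int) (d+1) ↔ t ∈ pvVisAt board (n:Int) d := by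
          intro t
          constructor
          · intro h
            rcases h4 t h with h' | h' | ⟨z, hz, _⟩
            · exact h'
            · simp at h'
            · simp at hz
          · exact fun h => pvVisAt_mono board _ (Nat.le_succ d) h
        have hPd : pvPb board (n:Int) d = false :=
          (pvShift board (n:Int) d D [] ⟨h1, h2, h3, h4, h5, h6⟩).2
        have hall : ∀ j, pvPb board (n:Int) j = false := by
          intro j
          rcases Nat.lt_trichotomy j d with h | rfl | h
          · exact hmin j h
          · exact hPd
          · rcases hcon : pvPb board (n:Int) j with _ | _
            · rfl
            · obtain ⟨s, hs, hgg⟩ := (pvPb_iff board (n:Int) j).mp hcon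
              have hsd := (pvStable board (n:Int) d hstab j (by omega) s).mp hs
              have hPd' : pvPb board (n:Int) d = true :=
                (pvPb_iff board (n:Int) d).mpr ⟨s, hsd, hgg⟩
              rw [hPd] at hPd'
              exact absurd hPd' (by simp)
        show loopQ board (n : Int) D ([] ++ []) (f + 1) = pvFind board
        rw [show loopQ board (n : Int) D ([] ++ []) (f + 1) = none from rfl]
        unfold pvFind
        rw [List.find?_eq_none.mpr (fun a _ => by rw [hlen]; simp [hall a])]
        rfl
      · -- level exhausted: shift up and pop
        obtain ⟨hInv', hPd⟩ := pvShift board (n:Int) d D (y :: R2) hInv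
        have hmin' : ∀ j, j < d + 1 → pvPb board (n:Int) j = false := by
          intro j hj
          rcases Nat.lt_or_ge j d with h | h
          · exact hmin j h
          · have hjd : j = d := by omega
            rw [hjd]
            exact hPd
        have hphi2 : pvPhi ((pvAllSt n).length : Int) D ((y :: R2) ++ []) + 1 ≤ (f:Int) + 1 := by
          rw [List.append_nil]
          rw [List.nil_append] at hphi
          push_cast at hphi
          linarith
        have hres := pvPop board n hn hlen f ihf (d+1) D y R2 [] hInv' hmin' hphi2
        rw [List.append_nil] at hres
        rw [List.nil_append]
        exact hres
    · exact pvPop board n hn hlen f ihf d D x R L2 hInv hmin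
        (by push_cast at hphi ⊢; linarith)

-- B's loop scans the closure rounds in order
lemma pvLoopC_eq (board : List (List Int)) (N : Int) :
    ∀ (r k : Nat), loopC board N (pvVisAt board N k) k r =
      ((List.range' k r).find? (pvPb board N)).map (fun j => ((j : Nat) : Int)) := by
  intro r
  induction r with
  | zero => intro k; rfl
  | succ r ih =>
    intro k
    rw [List.range'_succ]
    rcases hk : pvPb board N k with _ | _
    · have hk' : ¬ pvPb board N k = true := by simp [hk]
      rw [List.find?_cons_of_neg hk']
      have hstep : loopC board N (pvVisAt board N k) k (r+1) =
          loopC board N (pvVisAt board N (k+1)) (k+1) r := by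
        simp only [loopC]
        rw [show ((pvVisAt board N k).any fun s =>
            decide (s.1 = (N-1, N-1)) || decide (s.2 = (N-1, N-1))) = false from hk]
        rfl
      rw [hstep, ih (k+1)]
    · rw [List.find?_cons_of_pos hk]
      simp only [loopC]
      rw [show ((pvVisAt board N k).any fun s =>
          decide (s.1 = (N-1, N-1)) || decide (s.2 = (N-1, N-1))) = true from hk]
      rfl

-- the initial queue-BFS configuration satisfies the invariant
lemma pvQInv_init (board : List (List Int)) (n : Nat) (hn : 2 ≤ n) :
    pvQInv board (n : Int) 0
      (PySem.Dict.ofList [((((0:Int), (0:Int)), ((0:Int), (1:Int))), (0:Int))])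
      [(0, ((0, 0), (0, 1)))] [] := by
  have hstart : pvStart ∈ pvVisAt board (n : Int) 0 :=
    (PySem.Set.mem_ofList _ _).mpr (by simp)
  refine ⟨?_, ?_, ?_, ?_, ?_, ?_, ?_⟩
  · intro x hx
    simp only [List.mem_singleton] at hx
    subst hx
    exact ⟨by simp, hstart⟩
  · intro x hx
    simp at hx
  · intro s hM
    unfold pvMk at hM
    rw [show PySem.Dict.ofList [((((0:Int), (0:Int)), ((0:Int), (1:Int))), (0:Int))] =
        PySem.Dict.empty.insert pvStart 0 from rfl, PySem.Dict.getD_insert] at hM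
    by_cases hs : s = pvStart
    · subst hs
      exact Or.inl hstart
    · rw [if_neg hs, PySem.Dict.getD_empty] at hM
      exact absurd rfl hM
  · intro t ht
    rcases (mem_pvVisAt_succ board (n : Int) 0 t).mp ht with h | ⟨p, hp, hnb⟩
    · exact Or.inl h
    · right; right
      have hps : p = pvStart := by
        have := (PySem.Set.mem_ofList _ _).mp hp
        simpa using this
      subst hps
      exact ⟨(0, ((0, 0), (0, 1))), by simp, hnb⟩
  · intro s hs hg
    have hss : s = pvStart := by
      have := (PySem.Set.mem_ofList _ _).mp hs
      simpa using this
    subst hss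
    simp [pvStart]
  · exact PySem.Dict.nodup_keys_ofList _
  · intro s hs
    rw [show (PySem.Dict.ofList
        [((((0:Int), (0:Int)), ((0:Int), (1:Int))), (0:Int))]).keys = [pvStart] from rfl] at hs
    simp only [List.mem_singleton] at hs
    subst hs
    exact pvVisAt_inRange board n hn 0 pvStart hstart

lemma pvPhi_init (board : List (List Int)) (n : Nat) (hlen : board.length = n) :
    pvPhi ((pvAllSt n).length : Int)
        (PySem.Dict.ofList [((((0:Int), (0:Int)), ((0:Int), (1:Int))), (0:Int))])
        ([(0, ((0, 0), (0, 1)))] ++ []) + 1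
      ≤ ((40 * board.length * board.length + 2 : Nat) : Int) := by
  have hC : ((pvAllSt n).length : Int) ≤ 2 * (n:Int) * (n:Int) := by
    exact_mod_cast pvAllSt_len n
  have hkey : pvKeysLen
      (PySem.Dict.ofList [((((0:Int), (0:Int)), ((0:Int), (1:Int))), (0:Int))]) = 1 := rfl
  have hbad : pvBadLen
      (PySem.Dict.ofList [((((0:Int), (0:Int)), ((0:Int), (1:Int))), (0:Int))]) = 0 := rfl
  have hw0 : pvW 0 = 10 := by norm_num [pvW, pvINF]
  unfold pvPhi
  rw [hkey, hbad, List.append_nil]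
  simp only [List.map_cons, List.map_nil, List.sum_cons, List.sum_nil, hw0]
  rw [hlen]
  push_cast
  nlinarith [hC, sq_nonneg ((n:Int))]

-- ===== VERDICT (by name: the statement is the Claim_ definition above) =====
theorem solution_spec : Claim_equal_solution := by
  intro board _ hpre
  unfold Spec_solution
  obtain ⟨hn2, hrows⟩ := hpre
  have hA : solution board = loopA board (board.length : Int)
      (pvSet2 (List.replicate ((board.length : Int)).toNat
        (List.replicate (((board.length : Int)) - 1).toNat pvINF)) 0 0 0)
      (List.replicate (((board.length : Int)) - 1).toNat
        (List.replicate ((board.length : Int)).toNat pvINF))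
      [(0, 0, 0, 0)] (40 * board.length * board.length + 2) := rfl
  have hB : solution_alt board = loopC board (board.length : Int)
      (PySem.Set.ofList [pvStart]) 0 (2 * board.length * board.length + 1) := rfl
  rw [hA, hB]
  rw [pv_loop_eq board (board.length : Int) (40 * board.length * board.length + 2) _ _ _ _ _
    (pv_init board ⟨hn2, hrows⟩)]
  have hmin0 : ∀ j, j < 0 → pvPb board ((board.length : Nat) : Int) j = false := by
    intro j hj
    exact absurd hj (by omega)
  have hqe := pvLoopQ_eq board board.length hn2 rfl
    (40 * board.length * board.length + 2) 0
    (PySem.Dict.ofList [((((0:Int), (0:Int)), ((0:Int), (1:Int))), (0:Int))])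
    [(0, ((0, 0), (0, 1)))] []
    (pvQInv_init board board.length hn2) hmin0
    (pvPhi_init board board.length rfl)
  rw [List.append_nil] at hqe
  rw [hqe]
  have hce := pvLoopC_eq board (board.length : Int) (2 * board.length * board.length + 1) 0
  rw [show PySem.Set.ofList [pvStart] = pvVisAt board (board.length : Int) 0 from rfl, hce]
  unfold pvFind
  rw [List.range_eq_range']
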